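-- pv_equiv track=rewrite | github.com/hyprchs/hyprfen | src/hyprfen/bitops.py | pext
-- ===== SOURCE A (Python) =====
-- def pext(value: int, mask: int) -> int:
--     """Software implementation of BMI2 PEXT.
--
--     Extracts the bits of ``value`` selected by ``mask`` and packs them into the
--     low bits of the return value in increasing source-bit order.
--     """
--     out = 0
--     out_bit = 1
--     while mask:
--         lsb = mask & -mask
--         if value & lsb:
--             out |= out_bit
--         mask ^= lsb
--         out_bit <<= 1
--     return out
-- ===== SOURCE B (Python) =====
-- def pext(value, mask):
--     """Software implementation of BMI2 PEXT.
--
--     Recurses over bit positions: halve value and mask each step and rebuild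
--     the packed result from the low bit upward (vs. A's iterative loop that
--     isolates and clears the lowest set bit of the mask).
--     """
--     if not mask:
--         return 0
--     rest = pext(value >> 1, mask >> 1)
--     if mask & 1:
--         return (rest << 1) | (value & 1)
--     return rest
-- ===== Notes on version B (the rewrite author's own statement) =====
-- stated objective: alternative
-- what changed: B is a recursion over bit positions that halves value and mask and rebuilds the packed result from the low bit upward, instead of A's iterative loop that repeatedly isolates the lowest set bit of the mask with mask & -mask, tests it against value and clears it with xor.
import Mathlib
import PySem

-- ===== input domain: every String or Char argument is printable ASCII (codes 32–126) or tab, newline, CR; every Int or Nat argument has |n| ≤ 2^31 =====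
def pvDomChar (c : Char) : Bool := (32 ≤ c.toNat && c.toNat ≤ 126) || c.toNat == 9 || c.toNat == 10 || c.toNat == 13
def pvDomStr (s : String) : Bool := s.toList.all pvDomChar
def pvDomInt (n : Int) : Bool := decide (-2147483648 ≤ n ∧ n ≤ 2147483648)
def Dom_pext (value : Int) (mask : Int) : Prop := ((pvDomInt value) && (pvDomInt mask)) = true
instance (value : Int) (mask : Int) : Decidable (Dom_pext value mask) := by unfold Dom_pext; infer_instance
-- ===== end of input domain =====

-- B replaces A's lowest-set-bit isolation loop by a recursion over bit positions that
-- halves value and mask; same results on mask ≥ 0 (alternative decomposition, no speed claim).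


-- ===== PORT A =====
-- `while mask:` ported with fuel; mask.toNat + 1 iterations always suffice because each
-- iteration clears one set bit of a nonnegative mask (for mask < 0 Python never returns,
-- which Pre_pext excludes).
def pextLoop : Nat → Int → Int → Int → Int → Int
  | 0, _, out, _, _ => out
  | f + 1, value, out, out_bit, mask =>
    if mask ≠ 0 then
      let lsb := PySem.Int.band mask (-mask)
      pextLoop f value
        (if PySem.Int.band value lsb ≠ 0 then PySem.Int.bor out out_bit else out)
        (out_bit <<< (1 : Nat)) (PySem.Int.bxor mask lsb)
    else out

def pext (value : Int) (mask : Int) : Int := pextLoop (mask.toNat + 1) value 0 1 mask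

-- ===== PORT B =====
-- `if not mask: return 0` becomes the `0 < mask` guard: for mask < 0 Python B recurses
-- forever (excluded by Pre_pext), so the guard only makes the recursion total.
def pext_alt (value : Int) (mask : Int) : Int :=
  if 0 < mask then
    let rest := pext_alt (value >>> (1 : Nat)) (mask >>> (1 : Nat))
    if PySem.Int.band mask 1 ≠ 0 then PySem.Int.bor (rest <<< (1 : Nat)) (PySem.Int.band value 1)
    else rest
  else 0
termination_by mask.toNat
decreasing_by
  simp only [Int.shiftRight_eq_div_pow]
  omega

-- ===== PRECONDITION & SPEC =====
-- Pre_pext excludes mask < 0: there A's `while mask` loop never terminates (and B's Python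
-- recursion also never returns), so A produces no value on those inputs.
def Pre_pext (value : Int) (mask : Int) : Prop := 0 ≤ mask
instance (value : Int) (mask : Int) : Decidable (Pre_pext value mask) := by unfold Pre_pext; infer_instance
def pvWitness_pext : Int × Int := (45, 26)

def Spec_pext (value : Int) (mask : Int) (out : Int) : Prop := out = pext_alt value mask
instance (value : Int) (mask : Int) (out : Int) : Decidable (Spec_pext value mask out) := by unfold Spec_pext; infer_instance

-- ===== CLAIM (what is proved, stated in full; the proofs are below) =====
def Claim_equal_pext : Prop := ∀ (value : Int) (mask : Int), Dom_pext value mask → Pre_pext value mask → Spec_pext value mask (pext value mask)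

-- ===== LEMMAS AND PROOFS =====

-- lowest set bit of a natural number, in the subtraction form PySem.Int.band produces
def lsbN (n : Nat) : Nat := n - (n &&& (n - 1))

theorem tb_zero (a r : Nat) (hr : r ≤ 1) : (2 * a + r).testBit 0 = decide (r = 1) := by
  rw [Nat.testBit_zero]; congr 1; apply propext; omega

theorem tb_succ (a r i : Nat) (hr : r ≤ 1) : (2 * a + r).testBit (i + 1) = a.testBit i := by
  rw [Nat.testBit_succ]; congr 1; omega

theorem nand2 (a b r s : Nat) (hr : r ≤ 1) (hs : s ≤ 1) :
    (2 * a + r) &&& (2 * b + s) = 2 * (a &&& b) + r * s := by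
  apply Nat.eq_of_testBit_eq
  intro i
  have hrs : r * s ≤ 1 := by nlinarith
  cases i with
  | zero => rw [Nat.testBit_land, tb_zero _ _ hr, tb_zero _ _ hs, tb_zero _ _ hrs]
            rcases Nat.le_one_iff_eq_zero_or_eq_one.1 hr with h | h <;>
            rcases Nat.le_one_iff_eq_zero_or_eq_one.1 hs with h' | h' <;> subst h h' <;> decide
  | succ i => rw [Nat.testBit_land, tb_succ _ _ _ hr, tb_succ _ _ _ hs, tb_succ _ _ _ (by nlinarith),
                  Nat.testBit_land]

theorem nor2 (a b r s : Nat) (hr : r ≤ 1) (hs : s ≤ 1) :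
    (2 * a + r) ||| (2 * b + s) = 2 * (a ||| b) + (r + s - r * s) := by
  apply Nat.eq_of_testBit_eq
  intro i
  have hrs : r + s - r * s ≤ 1 := by
    rcases (by omega : r = 0 ∨ r = 1) with rfl | rfl <;> rcases (by omega : s = 0 ∨ s = 1) with rfl | rfl <;> decide
  cases i with
  | zero => rw [Nat.testBit_lor, tb_zero _ _ hr, tb_zero _ _ hs, tb_zero _ _ hrs]
            rcases (by omega : r = 0 ∨ r = 1) with rfl | rfl <;> rcases (by omega : s = 0 ∨ s = 1) with rfl | rfl <;> decide
  | succ i => rw [Nat.testBit_lor, tb_succ _ _ _ hr, tb_succ _ _ _ hs, tb_succ _ _ _ hrs,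
                  Nat.testBit_lor]

theorem nxor2 (a b r s : Nat) (hr : r ≤ 1) (hs : s ≤ 1) :
    (2 * a + r) ^^^ (2 * b + s) = 2 * (a ^^^ b) + (r + s - 2 * (r * s)) := by
  apply Nat.eq_of_testBit_eq
  intro i
  have hrs : r + s - 2 * (r * s) ≤ 1 := by
    rcases (by omega : r = 0 ∨ r = 1) with rfl | rfl <;> rcases (by omega : s = 0 ∨ s = 1) with rfl | rfl <;> decide
  cases i with
  | zero => rw [Nat.testBit_xor, tb_zero _ _ hr, tb_zero _ _ hs, tb_zero _ _ hrs]
            rcases (by omega : r = 0 ∨ r = 1) with rfl | rfl <;> rcases (by omega : s = 0 ∨ s = 1) with rfl | rfl <;> decide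
  | succ i => rw [Nat.testBit_xor, tb_succ _ _ _ hr, tb_succ _ _ _ hs, tb_succ _ _ _ hrs,
                  Nat.testBit_xor]

theorem lsbN_odd (x : Nat) : lsbN (2 * x + 1) = 1 := by
  unfold lsbN
  have h1 : 2 * x + 1 - 1 = 2 * x + 0 := by omega
  rw [h1, nand2 x x 1 0 (by omega) (by omega), Nat.and_self]
  omega

theorem lsbN_even (x : Nat) (hx : 0 < x) : lsbN (2 * x) = 2 * lsbN x := by
  unfold lsbN
  have h1 : 2 * x - 1 = 2 * (x - 1) + 1 := by omega
  have h2 : (2 * x : Nat) = 2 * x + 0 := by omega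
  rw [h1, h2, nand2 x (x - 1) 0 1 (by omega) (by omega)]
  have h3 : x &&& (x - 1) ≤ x := Nat.and_le_left
  omega

theorem lsbN_facts (n : Nat) (h : 0 < n) :
    0 < lsbN n ∧ lsbN n ≤ n ∧ n ^^^ lsbN n = n - lsbN n := by
  induction n using Nat.strong_induction_on with
  | _ n ih =>
    rcases (by omega : n % 2 = 1 ∨ n % 2 = 0) with hp | hp
    · obtain ⟨x, rfl⟩ : ∃ x, n = 2 * x + 1 := ⟨n / 2, by omega⟩
      rw [lsbN_odd]
      refine ⟨by omega, by omega, ?_⟩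
      have := nxor2 x 0 1 1 (by omega) (by omega)
      simpa using this
    · obtain ⟨x, rfl⟩ : ∃ x, n = 2 * x := ⟨n / 2, by omega⟩
      have hx : 0 < x := by omega
      obtain ⟨p1, p2, p3⟩ := ih x (by omega) hx
      rw [lsbN_even x hx]
      refine ⟨by omega, by omega, ?_⟩
      have hx2 : (2 * x : Nat) = 2 * x + 0 := by omega
      have hl2 : 2 * lsbN x = 2 * lsbN x + 0 := by omega
      rw [hx2, hl2, nxor2 x (lsbN x) 0 0 (by omega) (by omega), p3]
      omega

theorem or_two_pow (a k : Nat) (h : a < 2 ^ k) : a ||| 2 ^ k = a + 2 ^ k := by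
  induction k generalizing a with
  | zero =>
    have : a = 0 := by omega
    subst this; decide
  | succ k ih =>
    have ha : a = 2 * (a / 2) + a % 2 := by omega
    have hp : (2 ^ (k + 1) : Nat) = 2 * 2 ^ k + 0 := by ring
    rw [ha, hp, nor2 (a / 2) (2 ^ k) (a % 2) 0 (by omega) (by omega),
        ih (a / 2) (by omega)]
    omega

-- bridges from PySem's Int bit operations to the Nat level

theorem band_neg_natCast (n : Nat) (h : 0 < n) :
    PySem.Int.band (n : Int) (-(n : Int)) = (lsbN n : Int) := by
  have h1 : ¬ (0 ≤ -(n : Int)) := by omega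
  simp [PySem.Int.band, h1, lsbN]
  omega

theorem shr1_natCast (n : Nat) : ((n : Int) >>> (1 : Nat)) = ((n / 2 : Nat) : Int) := by
  rw [← Int.natCast_shiftRight]; norm_num [Nat.shiftRight_eq_div_pow]

theorem shl1_natCast (n : Nat) : ((n : Int) <<< (1 : Nat)) = ((2 * n : Nat) : Int) := by
  rw [Int.shiftLeft_eq]; push_cast; ring

theorem shr1_negSucc (a : Nat) : (Int.negSucc a) >>> (1 : Nat) = Int.negSucc (a / 2) := by
  rw [Int.shiftRight_eq_div_pow, Int.negSucc_eq, Int.negSucc_eq]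
  norm_num
  omega

theorem band_negSucc_natCast (a b : Nat) :
    PySem.Int.band (Int.negSucc a) (b : Int) = ((b - (b &&& a) : Nat) : Int) := by
  have h1 : ¬ (0 ≤ Int.negSucc a) := fun hh => absurd hh (Int.not_le.mpr (Int.negSucc_lt_zero a))
  have h2 : (-(Int.negSucc a) - 1).toNat = a := by rw [Int.negSucc_eq]; omega
  simp [PySem.Int.band, h1, h2]

theorem band_one_cases (v : Int) : ∃ c : Nat, c ≤ 1 ∧ PySem.Int.band v 1 = (c : Int) := by
  cases v with
  | ofNat a =>
    refine ⟨a &&& 1, by rw [Nat.and_one_is_mod]; omega, ?_⟩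
    have := PySem.Int.band_natCast a 1
    simpa using this
  | negSucc a =>
    refine ⟨1 - (1 &&& a), by omega, ?_⟩
    have := band_negSucc_natCast a 1
    simpa using this

theorem band_cast_one (n : Nat) : PySem.Int.band (n : Int) 1 = ((n % 2 : Nat) : Int) := by
  have := PySem.Int.band_natCast n 1
  simpa [Nat.and_one_is_mod] using this

theorem band_two_mul (v : Int) (b : Nat) :
    PySem.Int.band v ((2 * b : Nat) : Int) = 2 * PySem.Int.band (v >>> (1 : Nat)) (b : Int) := by
  cases v with
  | ofNat a =>
    have h1 : (Int.ofNat a) = ((a : Nat) : Int) := rfl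
    rw [h1, PySem.Int.band_natCast, shr1_natCast, PySem.Int.band_natCast]
    have h2 : a &&& 2 * b = 2 * (a / 2 &&& b) := by
      have := nand2 (a / 2) b (a % 2) 0 (by omega) (by omega)
      calc a &&& 2 * b = (2 * (a / 2) + a % 2) &&& (2 * b + 0) := by congr 1 <;> omega
        _ = 2 * (a / 2 &&& b) + a % 2 * 0 := this
        _ = 2 * (a / 2 &&& b) := by omega
    rw [h2]; push_cast; ring
  | negSucc a =>
    rw [band_negSucc_natCast, shr1_negSucc, band_negSucc_natCast]
    have h2 : 2 * b &&& a = 2 * (b &&& a / 2) := by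
      have := nand2 b (a / 2) 0 (a % 2) (by omega) (by omega)
      calc 2 * b &&& a = (2 * b + 0) &&& (2 * (a / 2) + a % 2) := by congr 1 <;> omega
        _ = 2 * (b &&& a / 2) + 0 * (a % 2) := this
        _ = 2 * (b &&& a / 2) := by omega
    have h3 : b &&& a / 2 ≤ b := Nat.and_le_left
    push_cast [h2]
    omega

-- facts about pext_alt (port B)

theorem alt_zero (v : Int) : pext_alt v 0 = 0 := by
  rw [pext_alt]; norm_num

theorem alt_even (x : Nat) (hx : 0 < x) (v : Int) :
    pext_alt v ((2 * x : Nat) : Int) = pext_alt (v >>> (1 : Nat)) (x : Int) := by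
  rw [pext_alt]
  have hpos : (0 : Int) < ((2 * x : Nat) : Int) := by push_cast; omega
  have hband : PySem.Int.band ((2 * x : Nat) : Int) 1 = 0 := by
    rw [band_cast_one]; norm_num [Nat.mul_mod_right]
  simp only [hpos, if_pos, hband, ne_eq, not_true_eq_false, if_neg]
  rw [shr1_natCast]
  norm_num

theorem alt_nonneg' : ∀ (N : Nat) (m : Int), m.toNat = N → ∀ v, ∃ a : Nat, pext_alt v m = (a : Int) := by
  intro N
  induction N using Nat.strong_induction_on with
  | _ N ih =>
    intro m hN v
    by_cases h : 0 < m
    · have hlt : (m >>> (1 : Nat)).toNat < N := by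
        rw [← hN]
        simp only [Int.shiftRight_eq_div_pow]
        omega
      obtain ⟨r, hr⟩ := ih _ hlt (m >>> (1 : Nat)) rfl (v >>> (1 : Nat))
      obtain ⟨c, hc1, hc⟩ := band_one_cases v
      rw [pext_alt, if_pos h]
      by_cases hb : PySem.Int.band m 1 ≠ 0
      · rw [if_pos hb, hr, hc, shl1_natCast, PySem.Int.bor_natCast]
        exact ⟨_, rfl⟩
      · rw [if_neg hb, hr]; exact ⟨_, rfl⟩
    · rw [pext_alt, if_neg h]; exact ⟨0, rfl⟩

theorem alt_peel : ∀ (n : Nat), 0 < n → ∀ (v : Int),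
    pext_alt v (n : Int) =
      (if PySem.Int.band v (lsbN n : Nat) ≠ 0 then 1 else 0) + 2 * pext_alt v ((n - lsbN n : Nat) : Int) := by
  intro n
  induction n using Nat.strong_induction_on with
  | _ n ih =>
    intro hn v
    rcases (by omega : n % 2 = 1 ∨ n % 2 = 0) with hp | hp
    · -- odd: n = 2x+1, the lowest set bit is bit 0
      obtain ⟨x, rfl⟩ : ∃ x, n = 2 * x + 1 := ⟨n / 2, by omega⟩
      rw [lsbN_odd]
      obtain ⟨c, hc1, hc⟩ := band_one_cases v
      obtain ⟨r, hr⟩ := alt_nonneg' _ _ rfl (v >>> (1 : Nat))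
      have hpos : (0 : Int) < ((2 * x + 1 : Nat) : Int) := by push_cast; omega
      have hband : PySem.Int.band ((2 * x + 1 : Nat) : Int) 1 ≠ 0 := by
        rw [band_cast_one]
        norm_num [Nat.add_mul_mod_self_left, Nat.mul_add_mod]
      have hhalf : ((2 * x + 1 : Nat) : Int) >>> (1 : Nat) = ((x : Nat) : Int) := by
        rw [shr1_natCast]; congr 1; omega
      rw [pext_alt, if_pos hpos]
      simp only [hband, if_pos, ne_eq, not_false_eq_true, hhalf]
      rw [hr, hc, shl1_natCast, PySem.Int.bor_natCast]
      have hR : pext_alt v ((2 * x + 1 - lsbN (2 * x + 1) : Nat) : Int) = (r : Int) := by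
        rw [lsbN_odd]
        rcases Nat.eq_zero_or_pos x with rfl | hx
        · simp only [show (2 * 0 + 1 - 1 : Nat) = 0 from rfl, Nat.cast_zero, alt_zero]
          have : pext_alt (v >>> (1 : Nat)) ((0 : Nat) : Int) = 0 := by simpa using alt_zero (v >>> (1 : Nat))
          rw [this] at hr
          omega
        · rw [show (2 * x + 1 - 1 : Nat) = 2 * x from by omega, alt_even x hx, hr]
      rw [lsbN_odd] at hR
      rw [hR]
      simp only [Nat.cast_one] at *
      rw [hc]
      have hor : (2 * r) ||| c = 2 * r + c := by
        have := nor2 r 0 0 c (by omega) hc1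
        simpa using this
      rw [hor]
      have hif : (if ((c : Nat) : Int) ≠ 0 then (1 : Int) else 0) = ((c : Nat) : Int) := by
        rcases (by omega : c = 0 ∨ c = 1) with rfl | rfl <;> norm_num
      rw [hif]
      push_cast
      ring
    · -- even: n = 2x, both programs defer to the shifted arguments
      obtain ⟨x, rfl⟩ : ∃ x, n = 2 * x := ⟨n / 2, by omega⟩
      have hx : 0 < x := by omega
      obtain ⟨hl1, hl2, _⟩ := lsbN_facts x hx
      rw [lsbN_even x hx, alt_even x hx]
      rw [ih x (by omega) hx (v >>> (1 : Nat))]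
      rw [band_two_mul v (lsbN x)]
      have hiff : (2 * PySem.Int.band (v >>> (1 : Nat)) ((lsbN x : Nat) : Int) ≠ 0) ↔
          (PySem.Int.band (v >>> (1 : Nat)) ((lsbN x : Nat) : Int) ≠ 0) := by
        constructor
        · intro h h2; exact h (by rw [h2]; ring)
        · intro h h2; exact h (by omega)
      have hsub : (2 * x - 2 * lsbN x : Nat) = 2 * (x - lsbN x) := by omega
      rw [hsub]
      have hRR : pext_alt v ((2 * (x - lsbN x) : Nat) : Int) =
          pext_alt (v >>> (1 : Nat)) ((x - lsbN x : Nat) : Int) := by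
        rcases Nat.eq_zero_or_pos (x - lsbN x) with hz | hpos2
        · rw [hz]; norm_num [alt_zero]
        · exact alt_even _ hpos2 v
      rw [hRR]
      congr 1
      split_ifs with h1 h2 h3 <;> first | rfl | (exfalso; rw [hiff] at *; tauto)

-- the main loop invariant for port A

theorem loop_eq (n : Nat) : ∀ (f : Nat), n < f → ∀ (v : Int) (out k : Nat), out < 2 ^ k →
    pextLoop f v (out : Int) ((2 ^ k : Nat) : Int) (n : Int) =
      (out : Int) + ((2 ^ k : Nat) : Int) * pext_alt v (n : Int) := by
  induction n using Nat.strong_induction_on with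
  | _ n ih =>
    intro f hf v out k hout
    obtain ⟨f, rfl⟩ : ∃ g, f = g + 1 := ⟨f - 1, by omega⟩
    rcases Nat.eq_zero_or_pos n with rfl | hn
    · simp only [pextLoop, Nat.cast_zero, ne_eq, not_true_eq_false, if_false, alt_zero]
      ring
    · obtain ⟨hl1, hl2, hxor⟩ := lsbN_facts n hn
      have hne : ((n : Nat) : Int) ≠ 0 := by push_cast; omega
      simp only [pextLoop, hne, ne_eq, not_false_eq_true, if_true]
      rw [band_neg_natCast n hn]
      have hxorC : PySem.Int.bxor ((n : Nat) : Int) ((lsbN n : Nat) : Int) = ((n - lsbN n : Nat) : Int) := by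
        rw [PySem.Int.bxor_natCast, hxor]
      rw [hxorC, shl1_natCast]
      have hnewbit : ((2 * 2 ^ k : Nat) : Int) = ((2 ^ (k + 1) : Nat) : Int) := by
        congr 1; ring
      rw [hnewbit]
      have horC : PySem.Int.bor ((out : Nat) : Int) ((2 ^ k : Nat) : Int) = ((out + 2 ^ k : Nat) : Int) := by
        rw [PySem.Int.bor_natCast, or_two_pow _ _ hout]
      rw [horC]
      have hpeel := alt_peel n hn v
      by_cases hb : PySem.Int.band v ((lsbN n : Nat) : Int) ≠ 0
      · rw [if_pos hb]
        rw [ih (n - lsbN n) (by omega) f (by omega) v (out + 2 ^ k) (k + 1) (by ring_nf; omega)]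
        rw [hpeel, if_pos hb]
        push_cast
        ring
      · rw [if_neg hb]
        rw [ih (n - lsbN n) (by omega) f (by omega) v out (k + 1)
          (lt_of_lt_of_le hout (Nat.pow_le_pow_right (by omega) (by omega)))]
        rw [hpeel, if_neg hb]
        push_cast
        ring

-- ===== VERDICT (by name: the statement is the Claim_ definition above) =====
theorem pext_spec : Claim_equal_pext := by
  intro v m _ hpre
  unfold Spec_pext pext
  have := loop_eq m.toNat (m.toNat + 1) (by omega) v 0 0 (by norm_num)
  simp only [pow_zero, Nat.cast_zero, Nat.cast_one] at this
  rw [show ((m.toNat : Nat) : Int) = m from Int.toNat_of_nonneg hpre] at this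
  rw [this]; ring
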